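-- pv_equiv track=rewrite | github.com/verypluming/ccg2lambda | scripts/theorem.py | InsertAxiomsInCoqScript
-- ===== SOURCE A (Python) =====
-- def InsertAxiomsInCoqScript(axioms, coq_script):
--   coq_script_lines = coq_script.split('\n')
--   theorem_line = GetTheoremLine(coq_script_lines)
--   for axiom in axioms:
--     axiom_name = axiom.split()[1]
--     coq_script_lines.insert(theorem_line, 'Hint Resolve {0}.'.format(axiom_name))
--     coq_script_lines.insert(theorem_line, axiom)
--   new_coq_script = '\n'.join(coq_script_lines)
--   return new_coq_script
--
-- def GetTheoremLine(coq_script_lines):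
--   for i, line in enumerate(coq_script_lines):
--     if line.startswith('Theorem '):
--       return i
--   assert False, 'There was no theorem defined in the coq script: {0}'\
--     .format('\n'.join(coq_script_lines))
-- ===== SOURCE B (Python) =====
-- def InsertAxiomsInCoqScript(axioms, coq_script):
--   block = [x for ax in reversed(axioms)
--              for x in (ax, 'Hint Resolve {0}.'.format(ax.split()[1]))]
--   lines = coq_script.split('\n')
--   out = []
--   for line in lines:
--     if line.startswith('Theorem '):
--       return '\n'.join(out + block + lines[len(out):])
--     out.append(line)
--   assert False, 'There was no theorem defined in the coq script: {0}'\
--     .format('\n'.join(lines))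
-- ===== Notes on version B (the rewrite author's own statement) =====
-- stated objective: alternative
-- what changed: B precomputes the whole insertion block with one flat comprehension over reversed(axioms) and then makes a single accumulator pass over the script lines, emitting the block when the first 'Theorem ' line is reached, instead of A's find-index-then-repeated-list.insert mutation.
import Mathlib
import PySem

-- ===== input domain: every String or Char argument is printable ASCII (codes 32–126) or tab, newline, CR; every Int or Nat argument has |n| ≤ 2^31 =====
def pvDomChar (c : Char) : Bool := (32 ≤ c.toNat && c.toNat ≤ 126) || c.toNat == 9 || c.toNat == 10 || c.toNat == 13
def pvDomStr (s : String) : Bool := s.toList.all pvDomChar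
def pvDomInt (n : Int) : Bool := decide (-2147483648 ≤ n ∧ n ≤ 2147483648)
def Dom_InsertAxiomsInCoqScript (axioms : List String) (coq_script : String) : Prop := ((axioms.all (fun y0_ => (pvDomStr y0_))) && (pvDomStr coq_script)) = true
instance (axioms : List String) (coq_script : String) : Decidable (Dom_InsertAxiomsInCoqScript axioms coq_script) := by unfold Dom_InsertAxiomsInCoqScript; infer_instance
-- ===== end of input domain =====

-- B precomputes the whole insertion block (flatMap over reversed axioms) and then makes one
-- accumulator pass over the lines, emitting the block at the first 'Theorem ' line, instead of
-- A's find-the-index-then-repeated-insert mutation (alternative decomposition, same cost class).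

def pvHintLine (name : String) : String :=
  PySem.Str.join "" ["Hint Resolve ", name, "."]

-- ===== PORT A =====
-- A's module-level GetTheoremLine (returns none where the Python assert fires; outside Pre_)
def pvGetTheoremLineGo (i : Nat) : List String → Option Nat
  | [] => none
  | l :: rest =>
      if PySem.Str.startswith l "Theorem " then some i else pvGetTheoremLineGo (i + 1) rest

def InsertAxiomsInCoqScript (axioms : List String) (coq_script : String) : String :=
  let lines := (PySem.Str.split? coq_script "\n").getD []
  match pvGetTheoremLineGo 0 lines with
  | none => ""   -- Python's assert raises here; excluded by Pre_
  | some t =>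
      let final := axioms.foldl (fun ls ax =>
        -- axiom.split()[1]; IndexError (none) excluded by Pre_
        let name := (PySem.List.pyGet? (PySem.Str.split₀ ax) 1).getD ""
        PySem.List.insert (PySem.List.insert ls (t : Int) (pvHintLine name)) (t : Int) ax) lines
      PySem.Str.join "\n" final

-- ===== PORT B =====
-- B's single pass over the lines with an accumulator `out`; none = the final assert (outside Pre_)
def pvEmit (block : List String) (out : List String) : List String → Option (List String)
  | [] => none
  | l :: rest =>
      if PySem.Str.startswith l "Theorem " then some (out ++ block ++ (l :: rest))
      else pvEmit block (out ++ [l]) rest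

def InsertAxiomsInCoqScript_alt (axioms : List String) (coq_script : String) : String :=
  let block := axioms.reverse.flatMap (fun ax =>
    [ax, pvHintLine ((PySem.List.pyGet? (PySem.Str.split₀ ax) 1).getD "")])
  let lines := (PySem.Str.split? coq_script "\n").getD []
  match pvEmit block [] lines with
  | none => ""   -- the assert raises here; excluded by Pre_
  | some ls => PySem.Str.join "\n" ls

-- ===== PRECONDITION & SPEC =====
-- Pre_ excludes exactly the inputs where Python A raises: no line starting with 'Theorem '
-- (assert in GetTheoremLine) or an axiom with fewer than two whitespace-separated tokens
-- (IndexError on axiom.split()[1]).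
def Pre_InsertAxiomsInCoqScript (axioms : List String) (coq_script : String) : Prop :=
  (∃ l ∈ (PySem.Str.split? coq_script "\n").getD [], PySem.Str.startswith l "Theorem " = true) ∧
  (∀ ax ∈ axioms, 2 ≤ (PySem.Str.split₀ ax).length)
instance (axioms : List String) (coq_script : String) : Decidable (Pre_InsertAxiomsInCoqScript axioms coq_script) := by
  unfold Pre_InsertAxiomsInCoqScript; infer_instance

def pvWitness_InsertAxiomsInCoqScript : List String × String :=
  (["Axiom ax1 : _False."], "Require Import Coq.\nTheorem t1 : _True.\nProof.")

def Spec_InsertAxiomsInCoqScript (axioms : List String) (coq_script : String) (out : String) : Prop := out = InsertAxiomsInCoqScript_alt axioms coq_script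
instance (axioms : List String) (coq_script : String) (out : String) : Decidable (Spec_InsertAxiomsInCoqScript axioms coq_script out) := by unfold Spec_InsertAxiomsInCoqScript; infer_instance

-- ===== CLAIM =====
def Claim_equal_InsertAxiomsInCoqScript : Prop := ∀ (axioms : List String) (coq_script : String), Dom_InsertAxiomsInCoqScript axioms coq_script → Pre_InsertAxiomsInCoqScript axioms coq_script → Spec_InsertAxiomsInCoqScript axioms coq_script (InsertAxiomsInCoqScript axioms coq_script)

-- ===== LEMMAS AND PROOFS =====

theorem pvGetTheoremLineGo_lt {lines : List String} :
    ∀ {i t : Nat}, pvGetTheoremLineGo i lines = some t → i ≤ t ∧ t < i + lines.length := by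
  induction lines with
  | nil => intro i t h; simp [pvGetTheoremLineGo] at h
  | cons l rest ih =>
      intro i t h
      simp only [pvGetTheoremLineGo] at h
      split at h
      · cases h; simp
      · have := ih h; simp only [List.length_cons]; omega

theorem pvGetTheoremLineGo_isSome {lines : List String}
    (h : ∃ l ∈ lines, PySem.Str.startswith l "Theorem " = true) :
    ∀ i, (pvGetTheoremLineGo i lines).isSome := by
  induction lines with
  | nil => simp at h
  | cons l rest ih =>
      intro i
      simp only [pvGetTheoremLineGo]
      split
      · simp
      · rename_i hs
        apply ih
        rcases h with ⟨x, hx, hxs⟩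
        rcases List.mem_cons.mp hx with rfl | hx
        · simp_all
        · exact ⟨x, hx, hxs⟩

theorem pvGetTheoremLineGo_shift (lines : List String) :
    ∀ i, pvGetTheoremLineGo i lines = (pvGetTheoremLineGo 0 lines).map (· + i) := by
  induction lines with
  | nil => intro i; simp [pvGetTheoremLineGo]
  | cons l rest ih =>
      intro i
      simp only [pvGetTheoremLineGo]
      split
      · simp
      · rw [ih (i + 1), ih 1, Option.map_map]
        cases pvGetTheoremLineGo 0 rest <;> simp; omega

-- A's insert-loop equals take/block/drop at the theorem index
theorem pvLoop_eq (t : Nat) (f : String → String)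
    (axioms : List String) :
    ∀ (ls : List String), t ≤ ls.length →
      axioms.foldl (fun ls ax =>
          PySem.List.insert (PySem.List.insert ls (t : Int) (f ax)) (t : Int) ax) ls
        = ls.take t ++
          axioms.reverse.foldl (fun acc ax => acc ++ [ax, f ax]) [] ++
          ls.drop t := by
  induction axioms with
  | nil => intro ls h; simp
  | cons ax rest ih =>
      intro ls h
      have htt : (ls.take t).length = t := by simp; omega
      have h1 : PySem.List.insert ls (t : Int) (f ax) = ls.take t ++ f ax :: ls.drop t :=
        PySem.List.insert_natCast ls t (f ax) h
      have hdrop : (ls.take t).drop t = [] := by simp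
      have h2 : PySem.List.insert (ls.take t ++ f ax :: ls.drop t) (t : Int) ax
          = ls.take t ++ ax :: f ax :: ls.drop t := by
        rw [PySem.List.insert_natCast (ls.take t ++ f ax :: ls.drop t) t ax (by simp; omega),
            List.take_append_of_le_length (by omega), List.take_take, min_self,
            List.drop_append_of_le_length (by omega), hdrop]
        simp
      have hlen2 : t ≤ (ls.take t ++ ax :: f ax :: ls.drop t).length := by simp; omega
      simp only [List.foldl_cons, h1, h2]
      rw [ih _ hlen2,
          List.take_append_of_le_length (by omega), List.take_take, min_self,
          List.drop_append_of_le_length (by omega), hdrop]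
      simp only [List.reverse_cons, List.foldl_append, List.foldl_cons, List.foldl_nil]
      simp

-- B's single pass equals take/block/drop at the theorem index
theorem pvEmit_eq (block : List String) :
    ∀ (lines out : List String),
      pvEmit block out lines
        = (pvGetTheoremLineGo 0 lines).map
            (fun t => out ++ lines.take t ++ block ++ lines.drop t) := by
  intro lines
  induction lines with
  | nil => intro out; simp [pvEmit, pvGetTheoremLineGo]
  | cons l rest ih =>
      intro out
      simp only [pvEmit, pvGetTheoremLineGo]
      split
      · simp
      · rw [ih, pvGetTheoremLineGo_shift rest 1]
        cases pvGetTheoremLineGo 0 rest <;> simp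

-- ===== VERDICT =====
theorem InsertAxiomsInCoqScript_spec : Claim_equal_InsertAxiomsInCoqScript := by
  intro axioms coq_script _ hpre
  rcases hpre with ⟨hth, -⟩
  have hsome := pvGetTheoremLineGo_isSome hth 0
  cases hgo : pvGetTheoremLineGo 0 ((PySem.Str.split? coq_script "\n").getD []) with
  | none => rw [hgo] at hsome; simp at hsome
  | some t =>
      have hlt : t < ((PySem.Str.split? coq_script "\n").getD []).length := by
        have := (pvGetTheoremLineGo_lt hgo).2; omega
      unfold Spec_InsertAxiomsInCoqScript InsertAxiomsInCoqScript InsertAxiomsInCoqScript_alt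
      simp only [pvEmit_eq, hgo, Option.map_some]
      rw [pvLoop_eq t
            (fun ax => pvHintLine ((PySem.List.pyGet? (PySem.Str.split₀ ax) 1).getD ""))
            axioms _ (by omega),
          PySem.List.foldl_append_eq_flatMap]
      simp
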